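-- pv_equiv track=rewrite | github.com/yongjae5717/TIL | Backjoon/silver/6603.py | solution
-- ===== SOURCE A (Python) =====
-- from itertools import permutations
--
-- def solution(lotto):
--     number = lotto[1:]
--     set_list = set()
--     for permutation in permutations(number, 6):
--         temp = list(map(int, sorted(permutation)))
--         set_list.add(tuple(temp))
--     result = sorted(list(set_list))
--     return result
-- ===== SOURCE B (Python) =====
-- def solution(lotto):
--     number = lotto[1:]
--     result = set()
--
--     def dfs(start, chosen):
--         if len(chosen) == 6:
--             result.add(tuple(map(int, sorted(chosen))))
--             return
--         for i in range(start, len(number)):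
--             dfs(i + 1, chosen + [number[i]])
--
--     dfs(0, [])
--     return sorted(result)
-- ===== Notes on version B (the rewrite author's own statement) =====
-- stated objective: faster
-- what changed: Replaces the enumerate-all-6-permutations-then-dedup loop by a backtracking DFS over start indices that builds each 6-element combination exactly once before deduplicating and sorting.
import Mathlib
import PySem

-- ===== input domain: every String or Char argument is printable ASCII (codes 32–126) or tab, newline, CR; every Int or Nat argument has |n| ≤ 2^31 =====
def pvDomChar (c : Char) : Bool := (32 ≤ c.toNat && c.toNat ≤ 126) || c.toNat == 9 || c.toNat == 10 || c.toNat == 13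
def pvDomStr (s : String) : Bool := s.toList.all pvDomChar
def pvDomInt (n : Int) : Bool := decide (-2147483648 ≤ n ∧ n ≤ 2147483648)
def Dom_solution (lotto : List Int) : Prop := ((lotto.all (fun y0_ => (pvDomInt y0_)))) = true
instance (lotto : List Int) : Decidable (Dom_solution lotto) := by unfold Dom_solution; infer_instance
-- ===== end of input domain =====

-- B replaces A's enumerate-all-6-permutations-and-collapse loop by a backtracking DFS that
-- builds each 6-combination once (alternative decomposition; generates far fewer tuples).

-- ===== PORT A =====
-- A: for permutation in permutations(number, 6): set_list.add(tuple(map(int, sorted(permutation)))); return sorted(set_list)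
def solution (lotto : List Int) : List (List Int) :=
  let number := PySem.List.slice lotto (some 1) none
  let set_list : PySem.Set (List Int) :=
    (PySem.List.permutations number 6).foldl
      (fun s p => PySem.Set.add s ((PySem.List.sorted p (fun x => x)).map (fun n : Int => n)))
      PySem.Set.empty
  PySem.List.sorted set_list (fun x => x)

-- ===== PORT B =====
-- B's dfs(start, chosen): the loop 'for i in range(start, len(number)): dfs(i+1, chosen+[number[i]])'
-- is the structural recursion over the suffix number[start:] (= rest), threading the result set.
def dfsB : List Int → List Int → PySem.Set (List Int) → PySem.Set (List Int)
  | chosen, [], acc =>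
    if chosen.length = 6 then
      PySem.Set.add acc ((PySem.List.sorted chosen (fun x => x)).map (fun n : Int => n))
    else acc
  | chosen, x :: xs, acc =>
    if chosen.length = 6 then
      PySem.Set.add acc ((PySem.List.sorted chosen (fun x => x)).map (fun n : Int => n))
    else dfsB chosen xs (dfsB (chosen ++ [x]) xs acc)

def solution_alt (lotto : List Int) : List (List Int) :=
  let number := PySem.List.slice lotto (some 1) none
  PySem.List.sorted (dfsB [] number PySem.Set.empty) (fun x => x)

-- ===== PRECONDITION & SPEC =====
def Spec_solution (lotto : List Int) (out : List (List Int)) : Prop := out = solution_alt lotto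
instance (lotto : List Int) (out : List (List Int)) : Decidable (Spec_solution lotto out) := by unfold Spec_solution; infer_instance

-- ===== CLAIM (what is proved, stated in full; the proofs are below) =====
def Claim_equal_solution : Prop := ∀ (lotto : List Int), Dom_solution lotto → Spec_solution lotto (solution lotto)

-- ===== LEMMAS AND PROOFS =====

-- membership in B's DFS result set: acc's elements plus sorted(chosen ++ c) for every
-- way c to complete chosen to 6 elements from rest
theorem mem_dfsB (rest : List Int) : ∀ (chosen : List Int) (acc : PySem.Set (List Int)) (y : List Int),
    y ∈ dfsB chosen rest acc ↔
      y ∈ acc ∨ ∃ c, c.Sublist rest ∧ chosen.length + c.length = 6 ∧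
        y = PySem.List.sorted (chosen ++ c) (fun x => x) := by
  induction rest with
  | nil =>
    intro chosen acc y
    by_cases h : chosen.length = 6
    · rw [dfsB, if_pos h, PySem.Set.mem_add]
      simp only [List.map_id']
      constructor
      · rintro (hy | hy)
        · exact Or.inl hy
        · exact Or.inr ⟨[], List.Sublist.refl [], by simp [h], by simp [hy]⟩
      · rintro (hy | ⟨c, hc, _, hy⟩)
        · exact Or.inl hy
        · rw [List.sublist_nil] at hc; subst hc; simp at hy; exact Or.inr hy
    · rw [dfsB, if_neg h]
      constructor
      · exact Or.inl
      · rintro (hy | ⟨c, hc, hlen, _⟩)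
        · exact hy
        · rw [List.sublist_nil] at hc; subst hc; simp at hlen; omega
  | cons x xs ih =>
    intro chosen acc y
    by_cases h : chosen.length = 6
    · rw [dfsB, if_pos h, PySem.Set.mem_add]
      simp only [List.map_id']
      constructor
      · rintro (hy | hy)
        · exact Or.inl hy
        · exact Or.inr ⟨[], List.nil_sublist _, by simp [h], by simp [hy]⟩
      · rintro (hy | ⟨c, hc, hlen, hy⟩)
        · exact Or.inl hy
        · have hc0 : c = [] := by
            have := hc.length_le
            exact List.length_eq_zero_iff.1 (by omega)
          subst hc0; simp at hy; exact Or.inr hy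
    · rw [dfsB, if_neg h, ih, ih]
      constructor
      · rintro ((hy | ⟨c, hc, hlen, hy⟩) | ⟨c, hc, hlen, hy⟩)
        · exact Or.inl hy
        · refine Or.inr ⟨x :: c, List.cons_sublist_cons.2 hc, ?_, ?_⟩
          · simp only [List.length_append, List.length_cons, List.length_nil] at hlen ⊢; omega
          · simpa using hy
        · exact Or.inr ⟨c, hc.trans (List.sublist_cons_self x xs), hlen, hy⟩
      · rintro (hy | ⟨c, hc, hlen, hy⟩)
        · exact Or.inl (Or.inl hy)
        · rcases List.sublist_cons_iff.1 hc with hc' | ⟨c', rfl, hc'⟩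
          · exact Or.inr ⟨c, hc', hlen, hy⟩
          · refine Or.inl (Or.inr ⟨c', hc', ?_, ?_⟩)
            · simp only [List.length_append, List.length_cons, List.length_nil] at hlen ⊢; omega
            · simpa using hy

theorem nodup_dfsB (rest : List Int) : ∀ (chosen : List Int) (acc : PySem.Set (List Int)),
    acc.Nodup → (dfsB chosen rest acc).Nodup := by
  induction rest with
  | nil =>
    intro chosen acc hacc
    by_cases h : chosen.length = 6
    · rw [dfsB, if_pos h]; exact PySem.Set.nodup_add _ _ hacc
    · rw [dfsB, if_neg h]; exact hacc
  | cons x xs ih =>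
    intro chosen acc hacc
    by_cases h : chosen.length = 6
    · rw [dfsB, if_pos h]; exact PySem.Set.nodup_add _ _ hacc
    · rw [dfsB, if_neg h]; exact ih _ _ (ih _ _ hacc)

-- erasing the element at the junction of pre ++ a :: suf
theorem eraseIdx_append_cons (a : Int) : ∀ (pre suf : List Int),
    (pre ++ a :: suf).eraseIdx pre.length = pre ++ suf := by
  intro pre suf
  induction pre with
  | nil => simp
  | cons p ps ihp => simpa using ihp

-- a cons sublist of xs splits xs around its head
theorem cons_sublist_split (a : Int) (c : List Int) : ∀ (xs : List Int), (a :: c).Sublist xs →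
    ∃ pre suf, xs = pre ++ a :: suf ∧ c.Sublist suf := by
  intro xs h
  induction xs with
  | nil => simp at h
  | cons x xs' ih =>
    rcases List.sublist_cons_iff.1 h with h' | ⟨r, heq, hr⟩
    · obtain ⟨pre, suf, rfl, hs⟩ := ih h'
      exact ⟨x :: pre, suf, rfl, hs⟩
    · injection heq with h1 h2
      subst h1; subst h2
      exact ⟨[], xs', rfl, hr⟩

-- every length-r sublist of xs occurs among itertools' r-permutations of xs
theorem sublist_mem_permutations : ∀ (c xs : List Int), c.Sublist xs →
    c ∈ PySem.List.permutations xs c.length := by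
  intro c
  induction c with
  | nil => intro xs _; simp [PySem.List.permutations_zero]
  | cons a c' ih =>
    intro xs h
    obtain ⟨pre, suf, rfl, hsub⟩ := cons_sublist_split a c' xs h
    have hidx : (pre ++ a :: suf)[pre.length]? = some a := by
      simp
    have herase := eraseIdx_append_cons a pre suf
    show a :: c' ∈ PySem.List.permutations (pre ++ a :: suf) (c'.length + 1)
    rw [PySem.List.permutations]
    refine List.mem_flatMap.2 ⟨pre.length, ?_, ?_⟩
    · simp [List.mem_range, List.length_append]
    · rw [hidx, herase]
      exact List.mem_map.2 ⟨c', ih _ (hsub.trans (List.sublist_append_right pre suf)), rfl⟩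

-- sorted (no key) of a rearrangement, at the instances the ports elaborate with
theorem sorted_perm_eq (xs ys : List (List Int)) (h : xs.Perm ys) :
    PySem.List.sorted xs (fun x => x) = PySem.List.sorted ys (fun x => x) := by
  have h2 := PySem.List.sorted_eq_sorted_of_perm xs ys (fun x : List Int => x) (fun _ _ hxy => hxy) h
  convert h2 using 2

-- ===== VERDICT (by name: the statement is the Claim_ definition above) =====
theorem solution_spec : Claim_equal_solution := by
  intro lotto _
  show PySem.List.sorted
      ((PySem.List.permutations (PySem.List.slice lotto (some 1) none) 6).foldl
        (fun s p => PySem.Set.add s ((PySem.List.sorted p (fun x => x)).map (fun n : Int => n)))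
        PySem.Set.empty) (fun x => x)
      = PySem.List.sorted (dfsB [] (PySem.List.slice lotto (some 1) none) PySem.Set.empty) (fun x => x)
  set number := PySem.List.slice lotto (some 1) none with hnum
  rw [← PySem.Set.update_map_eq_foldl_add, PySem.Set.update_empty]
  have hmem : ∀ y, y ∈ PySem.Set.ofList ((PySem.List.permutations number 6).map
      (fun p => (PySem.List.sorted p (fun x => x)).map (fun n : Int => n)))
      ↔ y ∈ dfsB [] number PySem.Set.empty := ?_
  · exact sorted_perm_eq _ _
      ((List.perm_ext_iff_of_nodup (PySem.Set.nodup_ofList _) (nodup_dfsB _ _ _ List.nodup_nil)).2 hmem)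
  intro y
  rw [mem_dfsB]
  simp only [PySem.Set.mem_ofList, List.mem_map, List.map_id', PySem.Set.empty,
    List.not_mem_nil, false_or, List.nil_append, List.length_nil, Nat.zero_add]
  constructor
  · rintro ⟨p, hp, rfl⟩
    obtain ⟨hlen, rest, hperm⟩ := PySem.List.exists_perm_of_mem_permutations 6 number p hp
    obtain ⟨l, hlp, hls⟩ := (List.sublist_append_left p rest).subperm.trans hperm.subperm
    refine ⟨l, hls, by rw [hlp.length_eq, hlen], ?_⟩
    exact PySem.List.sorted_eq_sorted_of_perm _ _ (fun x => x) (fun _ _ hxy => hxy) hlp.symm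
  · rintro ⟨c, hc, hlen, rfl⟩
    exact ⟨c, by have := sublist_mem_permutations c number hc; rwa [hlen] at this, rfl⟩
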